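-- pv_equiv track=rewrite | github.com/yeeunlim/Algorithm | 프로그래머스/1/133499. 옹알이 （2）/옹알이 （2）.py | solution
-- ===== SOURCE A (Python) =====
-- def solution(babbling):
--     words = ["aya", "ye", "woo", "ma"]
--     result = 0
--     for babble in babbling:
--         stack = ''
--         last_word = ''
--         for char in babble:
--             stack += char
--             if stack in words:
--                 if stack != last_word:
--                     last_word = stack
--                     stack = ''
--                 else:
--                     break
--         if not stack:
--             result += 1
--
--     return result
-- ===== SOURCE B (Python) =====
-- def solution(babbling):
--     words = ["aya", "ye", "woo", "ma"]
--     count = 0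
--     for babble in babbling:
--         i = 0
--         prev = ''
--         ok = True
--         while i < len(babble):
--             tok = None
--             for w in words:
--                 if babble.startswith(w, i):
--                     tok = w
--                     break
--             if tok is None or tok == prev:
--                 ok = False
--                 break
--             prev = tok
--             i += len(tok)
--         if ok:
--             count += 1
--     return count
-- ===== Notes on version B (the rewrite author's own statement) =====
-- stated objective: alternative
-- what changed: B parses each babble token-by-token (an index plus a prefix scan over the four words, rejecting a repeated token) instead of A's char-by-char accumulation into a stack that is emptied whenever it equals a word.
import Mathlib
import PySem

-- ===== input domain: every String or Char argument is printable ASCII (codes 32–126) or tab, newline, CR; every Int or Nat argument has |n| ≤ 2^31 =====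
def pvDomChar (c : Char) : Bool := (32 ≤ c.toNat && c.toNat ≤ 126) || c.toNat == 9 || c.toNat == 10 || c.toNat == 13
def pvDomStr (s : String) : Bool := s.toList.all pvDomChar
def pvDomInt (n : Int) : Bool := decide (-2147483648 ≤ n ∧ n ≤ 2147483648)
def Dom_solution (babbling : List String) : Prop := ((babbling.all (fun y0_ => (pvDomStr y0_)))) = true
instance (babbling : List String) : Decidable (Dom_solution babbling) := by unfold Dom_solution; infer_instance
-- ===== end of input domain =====

-- B replaces A's char-by-char stack scanner by a token-by-token prefix parser; objective: alternative decomposition, same behaviour.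

-- ===== PORT A =====
def wordsA : List (List Char) := [['a','y','a'], ['y','e'], ['w','o','o'], ['m','a']]

-- inner `for char in babble` loop of A: state = (stack, last_word); `break` returns the (nonempty) stack
def aLoop : List Char → List Char → List Char → List Char
  | [], stack, _ => stack
  | c :: rest, stack, last =>
    let s := stack ++ [c]
    if s ∈ wordsA then
      if s ≠ last then aLoop rest [] s else s
    else aLoop rest s last

def solution (babbling : List String) : Int :=
  babbling.foldl (fun result babble =>
    if aLoop babble.toList [] [] = [] then result + 1 else result) 0

-- ===== PORT B =====
-- the first word the remaining suffix starts with (B's inner `for w in words` scan)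
def findWordB (s : List Char) : Option (List Char) :=
  wordsA.find? (fun w => w.isPrefixOf s)

-- B's `while i < len(babble)` loop on the remaining suffix; advancing i by len(w)
-- is dropping w.length chars of c :: rest, i.e. w.length - 1 chars of rest
def bLoop : List Char → List Char → Bool
  | [], _ => true
  | c :: rest, prev =>
    match findWordB (c :: rest) with
    | none => false
    | some w => if w = prev then false else bLoop (rest.drop (w.length - 1)) w
termination_by s _ => s.length
decreasing_by simp only [List.length_drop, List.length_cons]; omega

def solution_alt (babbling : List String) : Int :=
  babbling.foldl (fun count babble =>
    if bLoop babble.toList [] then count + 1 else count) 0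

-- ===== PRECONDITION & SPEC =====
def Spec_solution (babbling : List String) (out : Int) : Prop := out = solution_alt babbling
instance (babbling : List String) (out : Int) : Decidable (Spec_solution babbling out) := by unfold Spec_solution; infer_instance

-- ===== CLAIM (what is proved, stated in full; the proofs are below) =====
def Claim_equal_solution : Prop := ∀ (babbling : List String), Dom_solution babbling → Spec_solution babbling (solution babbling)

-- ===== LEMMAS AND PROOFS =====

-- once the stack is nonempty and no longer a prefix of any word, A's inner loop can never empty it
lemma aLoop_dead : ∀ (cs stack last : List Char), stack ≠ [] →
    (¬ stack <+: ['a','y','a']) → (¬ stack <+: ['y','e']) →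
    (¬ stack <+: ['w','o','o']) → (¬ stack <+: ['m','a']) →
    aLoop cs stack last ≠ [] := by
  intro cs
  induction cs with
  | nil => intro stack last h _ _ _ _; simpa [aLoop] using h
  | cons c rest ih =>
    intro stack last hne h1 h2 h3 h4
    have hpre : stack <+: stack ++ [c] := List.prefix_append _ _
    have hmem : stack ++ [c] ∉ wordsA := by
      intro hm
      simp only [wordsA, List.mem_cons, List.not_mem_nil, or_false] at hm
      rcases hm with he | he | he | he
      · exact h1 (he ▸ hpre)
      · exact h2 (he ▸ hpre)
      · exact h3 (he ▸ hpre)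
      · exact h4 (he ▸ hpre)
    rw [aLoop]
    simp only [if_neg hmem]
    exact ih _ last (by simp) (fun h => h1 (hpre.trans h)) (fun h => h2 (hpre.trans h))
      (fun h => h3 (hpre.trans h)) (fun h => h4 (hpre.trans h))

-- the two inner loops agree on every suffix and every previous word
lemma loop_eq : ∀ (n : Nat) (cs : List Char), cs.length ≤ n → ∀ (prev : List Char),
    ((aLoop cs [] prev = []) ↔ bLoop cs prev = true) := by
  intro n
  induction n with
  | zero =>
    intro cs h prev
    have : cs = [] := List.eq_nil_of_length_eq_zero (Nat.le_zero.mp h)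
    subst this
    simp [aLoop, bLoop]
  | succ n ih =>
    intro cs hlen prev
    rcases cs with _ | ⟨c, rest⟩
    · simp [aLoop, bLoop]
    by_cases ha : c = 'a'
    · subst ha
      rcases rest with _ | ⟨d, rest2⟩
      · rw [bLoop]; simp [aLoop, findWordB, wordsA, List.find?, List.isPrefixOf]
      by_cases hd : d = 'y'
      · subst hd
        rcases rest2 with _ | ⟨e, rest3⟩
        · rw [bLoop]; simp [aLoop, findWordB, wordsA, List.find?, List.isPrefixOf]
        by_cases he : e = 'a'
        · subst he
          have hrec := fun p => ih rest3 (by simp only [List.length_cons] at hlen; omega) p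
          rw [bLoop]
          by_cases hp : (['a','y','a'] : List Char) = prev
          · subst hp; simp [aLoop, findWordB, wordsA, List.find?, List.isPrefixOf]
          · simp [aLoop, findWordB, wordsA, List.find?, List.isPrefixOf, hp, hrec]
        · have hdead := aLoop_dead rest3 ['a','y',e] prev (by simp)
            (by simp [List.cons_prefix_cons, he]) (by simp [List.cons_prefix_cons])
            (by simp [List.cons_prefix_cons]) (by simp [List.cons_prefix_cons])
          have hb : ('a' == e) = false := by simp [Ne.symm he]
          rw [bLoop]
          simp [aLoop, findWordB, wordsA, List.find?, List.isPrefixOf, he, hb, hdead]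
      · have hdead := aLoop_dead rest2 ['a', d] prev (by simp)
          (by simp [List.cons_prefix_cons, hd]) (by simp [List.cons_prefix_cons])
          (by simp [List.cons_prefix_cons]) (by simp [List.cons_prefix_cons])
        have hb : ('y' == d) = false := by simp [Ne.symm hd]
        rw [bLoop]
        simp [aLoop, findWordB, wordsA, List.find?, List.isPrefixOf, hd, hb, hdead]
    by_cases hy : c = 'y'
    · subst hy
      rcases rest with _ | ⟨d, rest2⟩
      · rw [bLoop]; simp [aLoop, findWordB, wordsA, List.find?, List.isPrefixOf]
      by_cases hd : d = 'e'
      · subst hd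
        have hrec := fun p => ih rest2 (by simp only [List.length_cons] at hlen; omega) p
        rw [bLoop]
        by_cases hp : (['y','e'] : List Char) = prev
        · subst hp; simp [aLoop, findWordB, wordsA, List.find?, List.isPrefixOf]
        · simp [aLoop, findWordB, wordsA, List.find?, List.isPrefixOf, hp, hrec]
      · have hdead := aLoop_dead rest2 ['y', d] prev (by simp)
          (by simp [List.cons_prefix_cons]) (by simp [List.cons_prefix_cons, hd])
          (by simp [List.cons_prefix_cons]) (by simp [List.cons_prefix_cons])
        have hb : ('e' == d) = false := by simp [Ne.symm hd]
        rw [bLoop]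
        simp [aLoop, findWordB, wordsA, List.find?, List.isPrefixOf, hd, hb, hdead]
    by_cases hw : c = 'w'
    · subst hw
      rcases rest with _ | ⟨d, rest2⟩
      · rw [bLoop]; simp [aLoop, findWordB, wordsA, List.find?, List.isPrefixOf]
      by_cases hd : d = 'o'
      · subst hd
        rcases rest2 with _ | ⟨e, rest3⟩
        · rw [bLoop]; simp [aLoop, findWordB, wordsA, List.find?, List.isPrefixOf]
        by_cases he : e = 'o'
        · subst he
          have hrec := fun p => ih rest3 (by simp only [List.length_cons] at hlen; omega) p
          rw [bLoop]
          by_cases hp : (['w','o','o'] : List Char) = prev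
          · subst hp; simp [aLoop, findWordB, wordsA, List.find?, List.isPrefixOf]
          · simp [aLoop, findWordB, wordsA, List.find?, List.isPrefixOf, hp, hrec]
        · have hdead := aLoop_dead rest3 ['w','o',e] prev (by simp)
            (by simp [List.cons_prefix_cons]) (by simp [List.cons_prefix_cons])
            (by simp [List.cons_prefix_cons, he]) (by simp [List.cons_prefix_cons])
          have hb : ('o' == e) = false := by simp [Ne.symm he]
          rw [bLoop]
          simp [aLoop, findWordB, wordsA, List.find?, List.isPrefixOf, he, hb, hdead]
      · have hdead := aLoop_dead rest2 ['w', d] prev (by simp)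
          (by simp [List.cons_prefix_cons]) (by simp [List.cons_prefix_cons])
          (by simp [List.cons_prefix_cons, hd]) (by simp [List.cons_prefix_cons])
        have hb : ('o' == d) = false := by simp [Ne.symm hd]
        rw [bLoop]
        simp [aLoop, findWordB, wordsA, List.find?, List.isPrefixOf, hd, hb, hdead]
    by_cases hm : c = 'm'
    · subst hm
      rcases rest with _ | ⟨d, rest2⟩
      · rw [bLoop]; simp [aLoop, findWordB, wordsA, List.find?, List.isPrefixOf]
      by_cases hd : d = 'a'
      · subst hd
        have hrec := fun p => ih rest2 (by simp only [List.length_cons] at hlen; omega) p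
        rw [bLoop]
        by_cases hp : (['m','a'] : List Char) = prev
        · subst hp; simp [aLoop, findWordB, wordsA, List.find?, List.isPrefixOf]
        · simp [aLoop, findWordB, wordsA, List.find?, List.isPrefixOf, hp, hrec]
      · have hdead := aLoop_dead rest2 ['m', d] prev (by simp)
          (by simp [List.cons_prefix_cons]) (by simp [List.cons_prefix_cons])
          (by simp [List.cons_prefix_cons]) (by simp [List.cons_prefix_cons, hd])
        have hb : ('a' == d) = false := by simp [Ne.symm hd]
        rw [bLoop]
        simp [aLoop, findWordB, wordsA, List.find?, List.isPrefixOf, hd, hb, hdead]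
    · have hdead := aLoop_dead rest [c] prev (by simp)
        (by simp [List.cons_prefix_cons, ha]) (by simp [List.cons_prefix_cons, hy])
        (by simp [List.cons_prefix_cons, hw]) (by simp [List.cons_prefix_cons, hm])
      have hba : ('a' == c) = false := by simp [Ne.symm ha]
      have hby : ('y' == c) = false := by simp [Ne.symm hy]
      have hbw : ('w' == c) = false := by simp [Ne.symm hw]
      have hbm : ('m' == c) = false := by simp [Ne.symm hm]
      rw [bLoop]
      simp [aLoop, findWordB, wordsA, List.find?, List.isPrefixOf, ha, hy, hw, hm,
        hba, hby, hbw, hbm, hdead]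

lemma fold_eq_aux : ∀ (bs : List String) (acc : Int),
    bs.foldl (fun result babble => if aLoop babble.toList [] [] = [] then result + 1 else result) acc
      = bs.foldl (fun count babble => if bLoop babble.toList [] then count + 1 else count) acc := by
  intro bs
  induction bs with
  | nil => intro acc; rfl
  | cons b bs ih =>
    intro acc
    simp only [List.foldl_cons]
    rw [if_congr (by
      constructor
      · intro h; exact (loop_eq b.toList.length b.toList le_rfl []).mp h
      · intro h; exact (loop_eq b.toList.length b.toList le_rfl []).mpr h) rfl rfl]
    exact ih _

lemma fold_eq (babbling : List String) : solution babbling = solution_alt babbling :=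
  fold_eq_aux babbling 0

-- ===== VERDICT (by name: the statement is the Claim_ definition above) =====
theorem solution_spec : Claim_equal_solution := by
  intro babbling _
  unfold Spec_solution
  exact fold_eq babbling
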